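-- pv_equiv track=rewrite | github.com/concho1/codingTest_2023 | 누울 자리를 찾아라.py | dot_cal
-- ===== SOURCE A (Python) =====
-- def dot_cal(str_list):
--     total_cnt = 0
--     for st in str_list:
--         dot_cnt = 0
--         for ch in st:
--             if ch == '.':
--                 dot_cnt += 1
--             else:
--                 dot_cnt = 0
--
--             if dot_cnt == 2:
--                 total_cnt += 1
--     return total_cnt
-- ===== SOURCE B (Python) =====
-- def dot_cal(str_list):
--     total = 0
--     for st in str_list:
--         i, n = 0, len(st)
--         while i < n:
--             if st[i] == '.':
--                 j = i
--                 while j < n and st[j] == '.':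
--                     j += 1
--                 if j - i >= 2:
--                     total += 1
--                 i = j
--             else:
--                 i += 1
--     return total
-- ===== Notes on version B (the rewrite author's own statement) =====
-- stated objective: alternative
-- what changed: Replaces the running dot-counter that trips exactly at 2 by a run-scanner that jumps over each maximal run of dots and counts runs of length >= 2.
import Mathlib
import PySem

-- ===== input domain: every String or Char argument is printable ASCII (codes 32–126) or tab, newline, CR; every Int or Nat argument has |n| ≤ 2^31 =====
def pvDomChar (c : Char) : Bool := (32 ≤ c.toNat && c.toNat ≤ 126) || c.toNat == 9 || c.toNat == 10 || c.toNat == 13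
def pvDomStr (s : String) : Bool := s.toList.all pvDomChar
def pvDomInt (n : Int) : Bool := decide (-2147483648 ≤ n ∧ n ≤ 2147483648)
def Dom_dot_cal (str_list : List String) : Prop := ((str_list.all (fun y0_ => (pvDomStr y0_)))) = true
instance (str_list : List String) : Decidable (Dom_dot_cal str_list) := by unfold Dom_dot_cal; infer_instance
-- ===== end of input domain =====

-- B replaces A's running dot-counter (which trips exactly when it reaches 2) by a scanner that
-- jumps over each maximal run of dots and counts the runs of length ≥ 2. Alternative, same cost.

-- ===== PORT A =====
-- inner loop of A over the characters of one string: state (dot_cnt, total_cnt)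
def dotCalInner (cs : List Char) (dotCnt : Int) (total : Int) : Int :=
  match cs with
  | [] => total
  | c :: rest =>
    let d := if c = '.' then dotCnt + 1 else 0
    dotCalInner rest d (if d = 2 then total + 1 else total)

def dot_cal (str_list : List String) : Int :=
  str_list.foldl (fun total st => dotCalInner st.toList 0 total) 0

-- ===== PORT B =====
-- B's inner while-loop: skip non-dots; at a dot, consume the whole maximal run (takeWhile/dropWhile
-- mirror Source B's inner 'while j < n and st[j] == "."' scan) and count it when its length ≥ 2
def dotRuns (cs : List Char) : Int :=
  match cs with
  | [] => 0
  | c :: rest =>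
    if c = '.' then
      let run := rest.takeWhile (· = '.')
      (if (run.length : Int) + 1 ≥ 2 then 1 else 0) + dotRuns (rest.dropWhile (· = '.'))
    else
      dotRuns rest
termination_by cs.length
decreasing_by
  · have := List.length_dropWhile_le (fun c => decide (c = '.')) rest
    simp; omega
  · simp

def dot_cal_alt (str_list : List String) : Int :=
  str_list.foldl (fun total st => total + dotRuns st.toList) 0

-- ===== PRECONDITION & SPEC =====
def Spec_dot_cal (str_list : List String) (out : Int) : Prop := out = dot_cal_alt str_list
instance (str_list : List String) (out : Int) : Decidable (Spec_dot_cal str_list out) := by unfold Spec_dot_cal; infer_instance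

-- ===== CLAIM (what is proved, stated in full; the proofs are below) =====
def Claim_equal_dot_cal : Prop := ∀ (str_list : List String), Dom_dot_cal str_list → Spec_dot_cal str_list (dot_cal str_list)

-- ===== LEMMAS AND PROOFS =====

-- consuming a run of dots with counter already ≥ 2 never increments again
theorem dotCalInner_dots (run : List Char) (h : ∀ c ∈ run, c = '.') :
    ∀ rest d t, 2 ≤ d → dotCalInner (run ++ rest) d t = dotCalInner rest (d + run.length) t := by
  induction run with
  | nil => intro rest d t _; simp
  | cons c cs ih =>
    intro rest d t hd
    have hc : c = '.' := h c (by simp)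
    have hcs : ∀ c ∈ cs, c = '.' := fun x hx => h x (by simp [hx])
    have h2 : ¬ (d + 1 = 2) := by omega
    simp only [List.cons_append, dotCalInner, hc, if_neg h2, if_pos]
    rw [ih hcs rest (d + 1) t (by omega)]
    congr 1
    push_cast [List.length_cons]
    ring

-- if cs starts with a non-dot (or is empty), the incoming counter is irrelevant
theorem dotCalInner_reset (cs : List Char) (h : ∀ c, cs.head? = some c → c ≠ '.') :
    ∀ d t, dotCalInner cs d t = dotCalInner cs 0 t := by
  intro d t
  cases cs with
  | nil => rfl
  | cons c rest =>
    have hc : c ≠ '.' := h c rfl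
    simp [dotCalInner, hc]

theorem head_dropWhile_not_dot (xs : List Char) :
    ∀ c, (xs.dropWhile (· = '.')).head? = some c → c ≠ '.' := by
  intro c hc
  have h := List.head?_dropWhile_not (fun c => decide (c = '.')) xs
  rw [hc] at h
  simpa using h

theorem dotCalInner_eq_runs : ∀ n cs, cs.length ≤ n → ∀ t, dotCalInner cs 0 t = t + dotRuns cs := by
  intro n
  induction n with
  | zero =>
    intro cs hlen t
    have : cs = [] := by cases cs <;> simp_all
    simp [this, dotCalInner, dotRuns]
  | succ n ih =>
    intro cs hlen t
    cases cs with
    | nil => simp [dotCalInner, dotRuns]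
    | cons c rest =>
      by_cases hc : c = '.'
      · subst hc
        have hstep : dotCalInner ('.' :: rest) 0 t = dotCalInner rest 1 t := by
          simp [dotCalInner]
        cases hrun : rest.takeWhile (· = '.') with
        | nil =>
          -- run of length 1: no increment; rest starts with a non-dot (or is empty)
          have hdrop : rest.dropWhile (· = '.') = rest := by
            cases rest with
            | nil => rfl
            | cons a b =>
              have : ¬ (a = '.') := by
                by_contra ha
                rw [ha] at hrun; simp at hrun
              simp [List.dropWhile, this]
          have hhead : ∀ x, rest.head? = some x → x ≠ '.' := by
            intro x hx
            cases rest with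
            | nil => cases hx
            | cons a b =>
              cases hx
              by_contra ha
              rw [ha] at hrun; simp at hrun
          rw [hstep, dotCalInner_reset rest hhead 1 t,
              ih rest (by simpa using Nat.le_of_succ_le_succ hlen) t, dotRuns]
          simp [hrun, hdrop]
        | cons c2 run' =>
          have hall : ∀ x ∈ rest.takeWhile (· = '.'), x = '.' := by
            intro x hx
            have := List.mem_takeWhile_imp hx
            simpa using this
          have hc2 : c2 = '.' := hall c2 (by rw [hrun]; simp)
          have hall' : ∀ x ∈ run', x = '.' := fun x hx => hall x (by rw [hrun]; simp [hx])
          have hsplit : rest = (c2 :: run') ++ rest.dropWhile (· = '.') := by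
            conv_lhs => rw [← List.takeWhile_append_dropWhile (p := fun c => decide (c = '.')) (l := rest)]
            rw [hrun]
          have hlen' : (rest.dropWhile (· = '.')).length ≤ n := by
            have h1 := List.length_dropWhile_le (fun c => decide (c = '.')) rest
            simp at hlen
            omega
          rw [hstep]
          conv_lhs => rw [hsplit]
          have hmid : dotCalInner ((c2 :: run') ++ rest.dropWhile (· = '.')) 1 t
              = dotCalInner (run' ++ rest.dropWhile (· = '.')) (1 + 1) (t + 1) := by
            simp [dotCalInner, hc2]
          rw [hmid,
              dotCalInner_dots run' hall' _ (1 + 1) (t + 1) (by norm_num),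
              dotCalInner_reset _ (head_dropWhile_not_dot rest) _ (t + 1),
              ih _ hlen' (t + 1), dotRuns]
          have hge : ((rest.takeWhile (· = '.')).length : Int) + 1 ≥ 2 := by
            rw [hrun]; simp; omega
          simp only [if_pos hge, if_true]
          ring
      · rw [dotRuns]
        simp only [if_neg hc]
        have hstep : dotCalInner (c :: rest) 0 t = dotCalInner rest 0 t := by
          simp [dotCalInner, hc]
        rw [hstep, ih rest (by simpa using Nat.le_of_succ_le_succ hlen) t]

theorem foldl_eq (l : List String) : ∀ t,
    l.foldl (fun total st => dotCalInner st.toList 0 total) t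
      = l.foldl (fun total st => total + dotRuns st.toList) t := by
  induction l with
  | nil => intro t; rfl
  | cons s l ih =>
    intro t
    simp only [List.foldl_cons]
    rw [dotCalInner_eq_runs s.toList.length s.toList le_rfl t, ih]

-- ===== VERDICT (by name: the statement is the Claim_ definition above) =====
theorem dot_cal_spec : Claim_equal_dot_cal := by
  intro l _
  unfold Spec_dot_cal dot_cal dot_cal_alt
  exact foldl_eq l 0
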